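-- pv_equiv track=rewrite | github.com/fanck0605/openwrt-ci | packages/files/net/smartdns/files/update_gfwlist.py | obtain_second_level_domain
-- ===== SOURCE A (Python) =====
-- def obtain_second_level_domain(domain: str, tlds: set[str]):
--     part_list = domain.split('.')
--     list_size = len(part_list)
--     sld = domain
--     for i in range(1, list_size):
--         # suffix of sld
--         suffix = '.'.join(part_list[i:])
--         if suffix in tlds:
--             return sld
--         sld = suffix
--     return None
-- ===== SOURCE B (Python) =====
-- def obtain_second_level_domain(domain: str, tlds: set[str]):
--     # single right-to-left pass, building each suffix incrementally by
--     # prepending one label instead of re-joining a slice for every index;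
--     # the last overwrite (smallest index) is the longest matching suffix,
--     # i.e. A's first left-to-right hit.
--     part_list = domain.split('.')
--     result = None
--     suffix = part_list[-1]
--     for i in range(len(part_list) - 1, 0, -1):
--         ext = part_list[i - 1] + '.' + suffix
--         if suffix in tlds:
--             result = ext
--         suffix = ext
--     return result
-- ===== Notes on version B (the rewrite author's own statement) =====
-- stated objective: alternative
-- what changed: Replaces the left-to-right scan that re-joins the slice part_list[i:] at every index by a single right-to-left pass that extends the current suffix by one prepended label per step and keeps overwriting a running best, so the final overwrite (smallest index) is the longest matching suffix.
import Mathlib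
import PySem

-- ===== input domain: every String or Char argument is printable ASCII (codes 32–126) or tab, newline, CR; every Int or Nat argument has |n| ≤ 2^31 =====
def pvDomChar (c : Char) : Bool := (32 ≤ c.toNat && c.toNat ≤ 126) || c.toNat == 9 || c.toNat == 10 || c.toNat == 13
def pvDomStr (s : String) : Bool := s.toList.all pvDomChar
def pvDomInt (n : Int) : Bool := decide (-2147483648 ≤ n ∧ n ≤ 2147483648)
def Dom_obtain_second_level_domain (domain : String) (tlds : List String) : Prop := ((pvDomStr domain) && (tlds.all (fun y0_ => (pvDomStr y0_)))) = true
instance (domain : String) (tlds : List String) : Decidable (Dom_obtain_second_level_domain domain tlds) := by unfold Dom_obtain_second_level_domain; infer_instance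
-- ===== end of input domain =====

-- ===== PORT A =====
-- B builds each suffix incrementally in one right-to-left pass instead of A's re-join per index (return value only; neither mutates).
def pvALoop (parts : List (List Char)) (tlds : List String) : List Int → List Char → Option String
  | [], _ => none
  | i :: rest, sld =>
    let suffix := PySem.Chars.join ['.'] (PySem.List.slice parts (some i) none)
    if PySem.Set.contains tlds (String.ofList suffix) then some (String.ofList sld)
    else pvALoop parts tlds rest suffix

def obtain_second_level_domain (domain : String) (tlds : List String) : Option String :=
  let part_list := PySem.Chars.splitOn domain.toList ['.']
  let list_size : Int := part_list.length
  pvALoop part_list tlds (PySem.List.pyRange 1 list_size 1) domain.toList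

-- ===== PORT B =====
def pvBLoop (parts : List (List Char)) (tlds : List String) : List Int → List Char → Option String → Option String
  | [], _, result => result
  | i :: rest, suffix, result =>
    let ext := PySem.List.pyGetD parts (i - 1) [] ++ '.' :: suffix
    let result' := if PySem.Set.contains tlds (String.ofList suffix) then some (String.ofList ext) else result
    pvBLoop parts tlds rest ext result'

def obtain_second_level_domain_alt (domain : String) (tlds : List String) : Option String :=
  let part_list := PySem.Chars.splitOn domain.toList ['.']
  pvBLoop part_list tlds (PySem.List.pyRange ((part_list.length : Int) - 1) 0 (-1))
    (PySem.List.pyGetD part_list (-1) []) none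

-- ===== PRECONDITION & SPEC =====
def Spec_obtain_second_level_domain (domain : String) (tlds : List String) (out : Option String) : Prop := out = obtain_second_level_domain_alt domain tlds
instance (domain : String) (tlds : List String) (out : Option String) : Decidable (Spec_obtain_second_level_domain domain tlds out) := by unfold Spec_obtain_second_level_domain; infer_instance

-- ===== CLAIM (what is proved, stated in full; the proofs are below) =====
def Claim_equal_obtain_second_level_domain : Prop := ∀ (domain : String) (tlds : List String), Dom_obtain_second_level_domain domain tlds → Spec_obtain_second_level_domain domain tlds (obtain_second_level_domain domain tlds)

-- ===== LEMMAS AND PROOFS =====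

-- the suffix '.'.join(parts[k:]) of the split domain
def pvS (parts : List (List Char)) (k : Nat) : List Char := PySem.Chars.join ['.'] (parts.drop k)

-- first index k in the list whose suffix is a TLD
def pvFirst (parts : List (List Char)) (tlds : List String) : List Nat → Option Nat
  | [] => none
  | k :: rest => if PySem.Set.contains tlds (String.ofList (pvS parts k)) then some k else pvFirst parts tlds rest

lemma pvFirst_append (parts : List (List Char)) (tlds : List String) (l1 l2 : List Nat) :
    pvFirst parts tlds (l1 ++ l2) =
      (match pvFirst parts tlds l1 with | some i => some i | none => pvFirst parts tlds l2) := by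
  induction l1 with
  | nil => simp [pvFirst]
  | cons k rest ih =>
    simp only [List.cons_append, pvFirst]
    by_cases h : String.ofList (pvS parts k) ∈ tlds
    · simp [h]
    · simp [h, ih]

lemma pvALoop_eq (parts : List (List Char)) (tlds : List String) :
    ∀ (m k : Nat), 1 ≤ k →
    pvALoop parts tlds ((List.range' k m).map (fun n : Nat => (n : Int))) (pvS parts (k - 1)) =
      (pvFirst parts tlds (List.range' k m)).map (fun i => String.ofList (pvS parts (i - 1))) := by
  intro m
  induction m with
  | zero => intro k hk; simp [pvALoop, pvFirst]
  | succ m ih =>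
    intro k hk
    rw [List.range'_succ]
    simp only [List.map_cons, pvALoop, pvFirst]
    have hsl : PySem.List.slice parts (some ((k : Nat) : Int)) none = parts.drop k :=
      PySem.List.slice_from_natCast parts k
    rw [hsl]
    have fold : ∀ j, PySem.Chars.join ['.'] (List.drop j parts) = pvS parts j := fun _ => rfl
    simp only [fold]
    by_cases h : String.ofList (pvS parts k) ∈ tlds
    · simp [h]
    · have := ih (k + 1) (by omega)
      rw [Nat.add_sub_cancel] at this
      simp [h, this]

lemma pvBLoop_eq (parts : List (List Char)) (tlds : List String) :
    ∀ (m k : Nat) (r : Option String), 1 ≤ k → k + m ≤ parts.length →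
    pvBLoop parts tlds (((List.range' k m).map (fun n : Nat => (n : Int))).reverse) (pvS parts (k + m - 1)) r =
      (match pvFirst parts tlds (List.range' k m) with
        | some i => some (String.ofList (pvS parts (i - 1)))
        | none => r) := by
  intro m
  induction m with
  | zero => intro k r hk hlen; simp [pvBLoop, pvFirst]
  | succ m ih =>
    intro k r hk hlen
    rw [List.range'_concat]
    rw [List.map_append, List.reverse_append]
    simp only [List.map_cons, List.map_nil, List.reverse_cons, List.reverse_nil, List.nil_append,
      List.singleton_append, one_mul]
    have hidx : k + m - 1 < parts.length := by omega
    have hlt : k + m < parts.length := by omega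
    rw [pvBLoop.eq_def]
    simp only []
    have hcast : (((k + m : Nat) : Int)) - 1 = ((k + m - 1 : Nat) : Int) := by omega
    have hget : PySem.List.pyGetD parts (((k + m : Nat) : Int) - 1) [] = parts[k + m - 1] := by
      rw [hcast, PySem.List.pyGetD_natCast, List.getD_eq_getElem _ _ hidx]
    have hdropne : parts.drop (k + m) ≠ [] := by
      intro hnil
      have := congrArg List.length hnil
      simp at this
      omega
    obtain ⟨q, qs, hq⟩ := List.exists_cons_of_ne_nil hdropne
    have hext : parts[k + m - 1] ++ '.' :: pvS parts (k + (m + 1) - 1) = pvS parts (k + m - 1) := by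
      have h1 : k + (m + 1) - 1 = k + m := by omega
      have h2 : parts.drop (k + m - 1) = parts[k + m - 1] :: parts.drop (k + m) := by
        have h3 : k + m - 1 + 1 = k + m := by omega
        rw [List.drop_eq_getElem_cons hidx, h3]
      rw [h1]
      simp only [pvS, h2, hq, PySem.Chars.join_cons_cons]
      simp
    rw [hget, hext]
    have h1 : k + (m + 1) - 1 = k + m := by omega
    rw [h1]
    rw [ih k _ hk (by omega)]
    rw [pvFirst_append]
    have fold : pvFirst parts tlds [k + m] =
        if String.ofList (pvS parts (k + m)) ∈ tlds then some (k + m) else none := by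
      simp [pvFirst]
    rw [fold]
    by_cases h : String.ofList (pvS parts (k + m)) ∈ tlds <;>
      cases hfst : pvFirst parts tlds (List.range' k m) <;> simp_all
lemma pvJoinSnoc (sep a b : List Char) (xs : List (List Char)) :
    PySem.Chars.join sep (xs ++ [a, b]) = PySem.Chars.join sep (xs ++ [a ++ sep ++ b]) := by
  induction xs with
  | nil => simp [PySem.Chars.join_cons_cons, PySem.Chars.join_singleton, List.append_assoc]
  | cons x l ih =>
    cases l with
    | nil =>
      simp only [List.nil_append, List.cons_append, PySem.Chars.join_cons_cons,
        PySem.Chars.join_singleton, List.append_assoc]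
    | cons y t =>
      simp only [List.cons_append, PySem.Chars.join_cons_cons] at *
      rw [ih]

lemma pvGoJoin (sep : List Char) (hsep : sep ≠ []) :
    ∀ (fuel : Nat) (l cur : List Char) (acc : List (List Char)), l.length ≤ fuel →
    PySem.Chars.join sep (PySem.Chars.splitOn.go sep fuel l cur acc) =
      PySem.Chars.join sep (acc.reverse ++ [cur.reverse ++ l]) := by
  intro fuel
  induction fuel with
  | zero =>
    intro l cur acc hl
    have : l = [] := List.eq_nil_of_length_eq_zero (Nat.le_zero.mp hl)
    subst this
    simp [PySem.Chars.splitOn.go]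
  | succ fuel ih =>
    intro l cur acc hl
    cases l with
    | nil => simp [PySem.Chars.splitOn.go]
    | cons c rest =>
      rw [PySem.Chars.splitOn.go]
      by_cases hp : sep.isPrefixOf (c :: rest) = true
      · simp only [hp, if_true]
        rw [ih _ _ _ (by
          have hs : 1 ≤ sep.length := by
            cases sep with | nil => exact absurd rfl hsep | cons _ _ => simp
          simp only [List.length_drop]
          simp at hl ⊢
          omega)]
        have hpre : sep ++ List.drop sep.length (c :: rest) = c :: rest :=
          List.prefix_iff_eq_append.mp (List.isPrefixOf_iff_prefix.mp hp)
        simp only [List.reverse_cons, List.reverse_nil, List.nil_append, List.append_assoc]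
        have h2 : ([cur.reverse] ++ [List.drop sep.length (c :: rest)] : List (List Char)) =
            [cur.reverse, List.drop sep.length (c :: rest)] := rfl
        rw [h2, pvJoinSnoc, List.append_assoc, hpre]
      · simp only [hp, Bool.false_eq_true, if_false]
        rw [ih _ _ _ (by simp at hl ⊢; omega)]
        simp
lemma pvJoinSplit (cs : List Char) :
    PySem.Chars.join ['.'] (PySem.Chars.splitOn cs ['.']) = cs := by
  show PySem.Chars.join ['.'] (PySem.Chars.splitOn.go ['.'] (cs.length + 1) cs [] []) = cs
  rw [pvGoJoin ['.'] (by simp) (cs.length + 1) cs [] [] (by omega)]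
  simp [PySem.Chars.join_singleton]

lemma pvRangeCast (k m : Nat) :
    PySem.List.pyRange (k : Int) ((k + m : Nat) : Int) 1 = (List.range' k m).map (fun n : Nat => (n : Int)) := by
  rw [PySem.List.pyRange_one, List.range'_eq_map_range, List.map_map]
  have : ((((k + m : Nat) : Int)) - (k : Int)).toNat = m := by omega
  rw [this]
  apply List.map_congr_left
  intro j _
  simp


-- ===== VERDICT (by name: the statement is the Claim_ definition above) =====
theorem obtain_second_level_domain_spec : Claim_equal_obtain_second_level_domain := by
  intro domain tlds _
  unfold Spec_obtain_second_level_domain obtain_second_level_domain obtain_second_level_domain_alt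
  dsimp only
  cases hn : (PySem.Chars.splitOn domain.toList ['.']).length with
  | zero =>
    rw [PySem.List.pyRange_one_eq_nil (by omega), PySem.List.pyRange_neg_one_eq_nil (by omega)]
    rfl
  | succ n' =>
    have hcast : ((n' + 1 : Nat) : Int) = ((1 + n' : Nat) : Int) := by omega
    have hr1 : PySem.List.pyRange 1 ((n' + 1 : Nat) : Int) 1 =
        (List.range' 1 n').map (fun n : Nat => (n : Int)) := by
      rw [hcast]; exact pvRangeCast 1 n'
    have hA0 : domain.toList = pvS (PySem.Chars.splitOn domain.toList ['.']) (1 - 1) := by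
      simp [pvS, pvJoinSplit]
    have hA := pvALoop_eq (PySem.Chars.splitOn domain.toList ['.']) tlds n' 1 (by omega)
    rw [← hA0] at hA
    have hr2 : PySem.List.pyRange (((n' + 1 : Nat) : Int) - 1) 0 (-1) =
        ((List.range' 1 n').map (fun n : Nat => (n : Int))).reverse := by
      rw [PySem.List.pyRange_neg_one_eq_reverse, ← hr1]
      norm_num
    have hlast : PySem.List.pyGetD (PySem.Chars.splitOn domain.toList ['.']) (-1) [] =
        pvS (PySem.Chars.splitOn domain.toList ['.']) (1 + n' - 1) := by
      have hidx : n' < (PySem.Chars.splitOn domain.toList ['.']).length := by omega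
      have hd : (PySem.Chars.splitOn domain.toList ['.']).drop n' =
          [(PySem.Chars.splitOn domain.toList ['.'])[n']] := by
        rw [List.drop_eq_getElem_cons hidx]
        have h0 : (PySem.Chars.splitOn domain.toList ['.']).drop (n' + 1) = [] := by
          apply List.drop_eq_nil_of_le; omega
        rw [h0]
      have h1 : 1 + n' - 1 = n' := by omega
      rw [h1]
      simp only [pvS, hd, PySem.Chars.join_singleton]
      simp [PySem.List.pyGetD, PySem.List.pyGet?, PySem.List.pyIdx?, hn]
    have hB := pvBLoop_eq (PySem.Chars.splitOn domain.toList ['.']) tlds n' 1 none (by omega) (by omega)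
    rw [← hlast] at hB
    rw [hr1, hA, hr2, hB]
    cases pvFirst (PySem.Chars.splitOn domain.toList ['.']) tlds (List.range' 1 n') <;> rfl
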